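-- pv_equiv track=rewrite | github.com/sevazhidkov/leonard | modules/wiki.py | select_sentences
-- ===== SOURCE A (Python) =====
-- def select_sentences(text, sentences):
--     result_text = ""
--     sentences_count = 0
--     for ch in text:
--         if sentences_count == sentences: break
--         if ch == ".": sentences_count += 1
--         result_text += ch
--     return result_text
-- ===== SOURCE B (Python) =====
-- def select_sentences(text, sentences):
--     idx = -1
--     count = 0
--     while True:
--         if count == sentences:
--             return text[:idx + 1]
--         nxt = text.find('.', idx + 1)
--         if nxt == -1:
--             return text
--         idx = nxt
--         count += 1
-- ===== Notes on version B (the rewrite author's own statement) =====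
-- stated objective: faster
-- what changed: B replaces A's char-by-char scan that appends to a string one character at a time with a while-loop that jumps from period to period using str.find and returns a single slice up to the last period found, avoiding A's quadratic string concatenation.
import Mathlib
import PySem

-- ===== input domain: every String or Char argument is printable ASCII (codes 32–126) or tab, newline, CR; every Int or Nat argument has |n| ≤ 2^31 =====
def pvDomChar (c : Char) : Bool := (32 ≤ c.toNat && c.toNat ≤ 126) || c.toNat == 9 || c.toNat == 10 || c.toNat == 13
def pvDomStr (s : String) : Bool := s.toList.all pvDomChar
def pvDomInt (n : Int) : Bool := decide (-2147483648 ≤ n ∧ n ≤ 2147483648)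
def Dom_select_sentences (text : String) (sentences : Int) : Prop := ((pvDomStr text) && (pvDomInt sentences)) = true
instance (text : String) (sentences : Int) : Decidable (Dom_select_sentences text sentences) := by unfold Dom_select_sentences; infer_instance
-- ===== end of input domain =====

-- B: jump from period to period with str.find and return one slice, instead of appending char by char (measured faster on the large timing inputs).

-- ===== PORT A =====
-- A's for-loop, step for step (state: sentences_count, result_text).
def selA (sentences : Int) : List Char → Int → List Char → List Char
  | [], _, acc => acc
  | c :: rest, cnt, acc =>
    if cnt = sentences then acc
    else selA sentences rest (if c = '.' then cnt + 1 else cnt) (acc ++ [c])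

def select_sentences (text : String) (sentences : Int) : String :=
  String.ofList (selA sentences text.toList 0 [])

-- ===== PORT B =====
-- B's while-True loop. Python's state is idx (last period, starts -1) and count; here the
-- position idx+1 is carried as `done` together with the suffix rest = cs.drop done, so that
-- text.find('.', idx+1) is Chars.find on that suffix (exact: PYSEM.md findFrom_natCast) and
-- the recursion is structural on the shrinking suffix; text[:idx+1] is cs.take done.
def selB (cs : List Char) (sentences : Int) (done : Nat) (rest : List Char) (count : Int) :
    List Char :=
  if count = sentences then cs.take done
  else
    let f := PySem.Chars.find rest ['.']
    if h : f = -1 then cs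
    else
      selB cs sentences (done + f.toNat + 1) (rest.drop (f.toNat + 1)) (count + 1)
termination_by rest.length
decreasing_by
  have hinf : ['.'] <:+: rest := PySem.Chars.find_ne_neg_one_iff rest ['.'] |>.mp h
  have : rest ≠ [] := by rintro rfl; simp [List.infix_nil] at hinf
  have : 0 < rest.length := List.length_pos_iff.mpr this
  simp only [List.length_drop]; omega

def select_sentences_alt (text : String) (sentences : Int) : String :=
  String.ofList (selB text.toList sentences 0 text.toList 0)

-- ===== PRECONDITION & SPEC =====
def Spec_select_sentences (text : String) (sentences : Int) (out : String) : Prop := out = select_sentences_alt text sentences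
instance (text : String) (sentences : Int) (out : String) : Decidable (Spec_select_sentences text sentences out) := by unfold Spec_select_sentences; infer_instance

-- ===== CLAIM (what is proved, stated in full; the proofs are below) =====
def Claim_equal_select_sentences : Prop := ∀ (text : String) (sentences : Int), Dom_select_sentences text sentences → Spec_select_sentences text sentences (select_sentences text sentences)

-- ===== LEMMAS AND PROOFS =====

-- reference function: the prefix of cs up to (and including) the k-th period
def takeUpTo (k : Int) : List Char → List Char
  | [] => []
  | c :: cs => if k = 0 then [] else c :: takeUpTo (k - (if c = '.' then 1 else 0)) cs

theorem takeUpTo_nil (k : Int) : takeUpTo k [] = [] := rfl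

theorem takeUpTo_cons (k : Int) (c : Char) (cs : List Char) :
    takeUpTo k (c :: cs) = if k = 0 then [] else c :: takeUpTo (k - (if c = '.' then 1 else 0)) cs := rfl

theorem takeUpTo_zero (cs : List Char) : takeUpTo 0 cs = [] := by
  cases cs <;> simp [takeUpTo]

theorem selA_eq_takeUpTo (sentences : Int) (cs : List Char) :
    ∀ (cnt : Int) (acc : List Char),
      selA sentences cs cnt acc = acc ++ takeUpTo (sentences - cnt) cs := by
  induction cs with
  | nil => intro cnt acc; simp [selA, takeUpTo_nil]
  | cons c cs ih =>
    intro cnt acc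
    by_cases h : cnt = sentences
    · simp [selA, takeUpTo_cons, h]
    · have hne : sentences - cnt ≠ 0 := by omega
      have e1 : selA sentences (c :: cs) cnt acc
          = selA sentences cs (if c = '.' then cnt + 1 else cnt) (acc ++ [c]) := by
        simp [selA, h]
      rw [e1, ih, takeUpTo_cons, if_neg hne]
      by_cases hc : c = '.'
      · rw [show sentences - (if c = '.' then cnt + 1 else cnt)
            = sentences - cnt - (if c = '.' then 1 else 0) by simp [hc]; ring]
        simp
      · rw [show sentences - (if c = '.' then cnt + 1 else cnt)
            = sentences - cnt - (if c = '.' then 1 else 0) by simp [hc]]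
        simp

-- takeUpTo passes over a period-free block unchanged (k ≠ 0)
theorem takeUpTo_dotfree (u : List Char) (hu : ∀ c ∈ u, c ≠ '.') :
    ∀ (k : Int) (v : List Char), k ≠ 0 → takeUpTo k (u ++ v) = u ++ takeUpTo k v := by
  induction u with
  | nil => intro k v _; simp
  | cons c u ih =>
    intro k v hk
    have hc : c ≠ '.' := hu c (by simp)
    rw [List.cons_append, takeUpTo_cons, if_neg hk]
    simp only [hc, if_false, sub_zero]
    rw [ih (fun d hd => hu d (by simp [hd])) k v hk, List.cons_append]

theorem takeUpTo_no_dot (rest : List Char) (h : ∀ c ∈ rest, c ≠ '.') (k : Int) (hk : k ≠ 0) :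
    takeUpTo k rest = rest := by
  have := takeUpTo_dotfree rest h k [] hk
  simpa [takeUpTo_nil] using this

theorem singleton_prefix_iff (a : Char) (l : List Char) : [a] <+: l ↔ l.head? = some a := by
  cases l with
  | nil => simp
  | cons b t =>
    constructor
    · rintro ⟨s, hs⟩; simp at hs; simp [hs.1]
    · intro h; simp at h; exact ⟨t, by simp [h]⟩

theorem singleton_infix_iff (a : Char) (l : List Char) : [a] <:+: l ↔ a ∈ l := by
  constructor
  · rintro ⟨s, t, rfl⟩; simp
  · intro h
    obtain ⟨s, t, rfl⟩ := List.append_of_mem h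
    exact ⟨s, t, by simp⟩

theorem selB_eq_takeUpTo (cs : List Char) (sentences : Int) :
    ∀ (done : Nat) (rest : List Char) (count : Int), rest = cs.drop done →
      selB cs sentences done rest count = cs.take done ++ takeUpTo (sentences - count) rest := by
  suffices H : ∀ (n : Nat) (done : Nat) (rest : List Char) (count : Int),
      rest.length = n → rest = cs.drop done →
      selB cs sentences done rest count = cs.take done ++ takeUpTo (sentences - count) rest by
    intro done rest count hrest; exact H rest.length done rest count rfl hrest
  intro n
  induction n using Nat.strong_induction_on with
  | _ n ih =>
    intro done rest count hlen hrest
    rw [selB]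
    by_cases hcnt : count = sentences
    · rw [if_pos hcnt, hcnt, sub_self, takeUpTo_zero, List.append_nil]
    · rw [if_neg hcnt]
      have hk : sentences - count ≠ 0 := by omega
      by_cases hf : PySem.Chars.find rest ['.'] = -1
      · rw [dif_pos hf]
        have hnd : ∀ c ∈ rest, c ≠ '.' := by
          intro c hc hce
          exact (PySem.Chars.find_eq_neg_one_iff rest ['.']).mp hf
            ((singleton_infix_iff '.' rest).mpr (hce ▸ hc))
        rw [takeUpTo_no_dot rest hnd _ hk, hrest, List.take_append_drop]
      · rw [dif_neg hf]
        have h0 : 0 ≤ PySem.Chars.find rest ['.'] := by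
          have := PySem.Chars.neg_one_le_find rest ['.']; omega
        obtain ⟨hpre, hmin⟩ := PySem.Chars.find_spec h0
        set j := (PySem.Chars.find rest ['.']).toNat with hj
        have hjlen : j < rest.length := by
          rcases hpre with ⟨t, ht⟩
          have : (rest.drop j).length ≠ 0 := by rw [← ht]; simp
          simp [List.length_drop] at this; omega
        have hgetj : rest[j] = '.' := by
          have := (singleton_prefix_iff '.' (rest.drop j)).mp hpre
          rwa [List.head?_drop, List.getElem?_eq_getElem hjlen, Option.some.injEq] at this
        -- rest = u ++ '.' :: v
        have hdropj : rest.drop j = '.' :: rest.drop (j + 1) := by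
          rw [List.drop_eq_getElem_cons hjlen, hgetj]
        have hsplit : rest = rest.take j ++ '.' :: rest.drop (j + 1) := by
          conv_lhs => rw [← List.take_append_drop j rest]
          rw [hdropj]
        have hufree : ∀ c ∈ rest.take j, c ≠ '.' := by
          intro c hc hce
          obtain ⟨i, hi, hgi⟩ := List.getElem_of_mem hc
          rw [List.getElem_take] at hgi
          have hij : i < j := by simp at hi; omega
          exact hmin i hij ((singleton_prefix_iff '.' _).mpr
            (by rw [List.head?_drop, List.getElem?_eq_getElem (by omega), hgi, hce]))
        -- recursive call via ih
        have hvd : rest.drop (j + 1) = cs.drop (done + j + 1) := by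
          rw [hrest, List.drop_drop]; ring_nf
        have hvlen : (rest.drop (j + 1)).length < n := by
          simp [List.length_drop]; omega
        rw [ih _ (hlen ▸ hvlen) (done + j + 1) _ (count + 1) rfl hvd]
        -- take splits
        have htake : cs.take (done + j + 1) = cs.take done ++ rest.take j ++ ['.'] := by
          rw [show done + j + 1 = done + (j + 1) by ring, List.take_add, ← hrest,
            List.take_add_one, List.getElem?_eq_getElem hjlen, hgetj, List.append_assoc]
          rfl
        conv_rhs => rw [hsplit]
        rw [takeUpTo_dotfree _ hufree _ _ hk, takeUpTo_cons, if_neg hk]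
        rw [htake]
        have : sentences - (count + 1) = sentences - count - (if ('.' : Char) = '.' then 1 else 0) := by
          simp; ring
        rw [this]
        simp

-- ===== VERDICT (by name: the statement is the Claim_ definition above) =====
theorem select_sentences_spec : Claim_equal_select_sentences := by
  intro text s _
  unfold Spec_select_sentences
  rw [select_sentences, select_sentences_alt, selA_eq_takeUpTo,
    selB_eq_takeUpTo _ _ 0 _ 0 (by simp)]
  simp
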